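-- pv_equiv track=rewrite | github.com/edisonly1/GenerativeTopologicalSymphonies | src/training/conductor_targets.py | _compute_phrase_ranges
-- ===== SOURCE A (Python) =====
-- def _compute_phrase_ranges(phrase_ids: list[int]) -> list[tuple[int, int]]:
--     """Convert a phrase-id stream into contiguous [start, end) spans."""
--     if not phrase_ids:
--         return []
--     ranges: list[tuple[int, int]] = []
--     start = 0
--     for index in range(1, len(phrase_ids)):
--         if phrase_ids[index] != phrase_ids[index - 1]:
--             ranges.append((start, index))
--             start = index
--     ranges.append((start, len(phrase_ids)))
--     return ranges
-- ===== SOURCE B (Python) =====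
-- def _compute_phrase_ranges(phrase_ids: list[int]) -> list[tuple[int, int]]:
--     """Convert a phrase-id stream into contiguous [start, end) spans."""
--     spans = []
--     pos = 0
--     n = len(phrase_ids)
--     while pos < n:
--         end = pos + 1
--         while end < n and phrase_ids[end] == phrase_ids[pos]:
--             end += 1
--         spans.append((pos, end))
--         pos = end
--     return spans
-- ===== Notes on version B (the rewrite author's own statement) =====
-- stated objective: alternative
-- what changed: A does one index scan over range(1,n) detecting boundaries by comparing each element to its predecessor while carrying a start variable; B is run-peeling with nested while loops: the outer loop emits one span per run, the inner loop extends the current run by comparing each element to the run's head, and no empty-input guard is needed.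
import Mathlib
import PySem

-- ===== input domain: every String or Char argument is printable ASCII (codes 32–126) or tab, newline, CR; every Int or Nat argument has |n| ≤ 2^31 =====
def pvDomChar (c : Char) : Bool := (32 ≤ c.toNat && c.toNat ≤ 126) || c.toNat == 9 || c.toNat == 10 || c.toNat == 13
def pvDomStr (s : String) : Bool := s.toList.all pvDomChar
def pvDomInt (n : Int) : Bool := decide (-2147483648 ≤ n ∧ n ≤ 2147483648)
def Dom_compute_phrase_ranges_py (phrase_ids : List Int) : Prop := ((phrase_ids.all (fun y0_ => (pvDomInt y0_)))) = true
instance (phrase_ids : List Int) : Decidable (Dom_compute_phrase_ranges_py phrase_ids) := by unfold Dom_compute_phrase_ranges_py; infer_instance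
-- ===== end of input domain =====

-- B replaces A's single boundary-detecting index scan by run-peeling with nested while loops
-- (outer loop per run, inner loop extends the run by comparing to its head) — alternative decomposition, same cost.


-- ===== PORT A =====
-- indexing is always in range (1 ≤ index < len), so pyGetD with default 0 is exact
def compute_phrase_ranges_py (phrase_ids : List Int) : List (Int × Int) :=
  if phrase_ids = [] then []
  else
    let st := (PySem.List.pyRange 1 (phrase_ids.length : Int) 1).foldl
      (fun (st : List (Int × Int) × Int) index =>
        if PySem.List.pyGetD phrase_ids index 0 ≠ PySem.List.pyGetD phrase_ids (index - 1) 0 then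
          (st.1 ++ [(st.2, index)], index)
        else st)
      ([], 0)
    st.1 ++ [(st.2, (phrase_ids.length : Int))]

-- ===== PORT B =====
-- inner while loop: advance end while end < n and phrase_ids[end] == phrase_ids[pos]
-- (indices stay in [0, n), so pyGetD with default 0 is exact)
def pvRunEnd (ids : List Int) (n : Int) (head : Int) (e : Int) : Int :=
  if h : e < n ∧ PySem.List.pyGetD ids e 0 = head then pvRunEnd ids n head (e + 1) else e
termination_by (n - e).toNat
decreasing_by omega

-- outer while loop: peel one run per iteration, appending its span
theorem pvRunEnd_ge (ids : List Int) (n : Int) (head : Int) (e : Int) : e ≤ pvRunEnd ids n head e := by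
  rw [pvRunEnd]
  split
  · exact le_trans (by omega) (pvRunEnd_ge ids n head (e + 1))
  · exact le_refl e
termination_by (n - e).toNat
decreasing_by omega

def pvPeel (ids : List Int) (n : Int) (pos : Int) (spans : List (Int × Int)) : List (Int × Int) :=
  if h : pos < n then
    let e := pvRunEnd ids n (PySem.List.pyGetD ids pos 0) (pos + 1)
    pvPeel ids n e (spans ++ [(pos, e)])
  else spans
termination_by (n - pos).toNat
decreasing_by
  have := pvRunEnd_ge ids n (PySem.List.pyGetD ids pos 0) (pos + 1)
  omega

def compute_phrase_ranges_py_alt (phrase_ids : List Int) : List (Int × Int) :=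
  pvPeel phrase_ids (phrase_ids.length : Int) 0 []

-- ===== PRECONDITION & SPEC =====
def Spec_compute_phrase_ranges_py (phrase_ids : List Int) (out : List (Int × Int)) : Prop := out = compute_phrase_ranges_py_alt phrase_ids
instance (phrase_ids : List Int) (out : List (Int × Int)) : Decidable (Spec_compute_phrase_ranges_py phrase_ids out) := by unfold Spec_compute_phrase_ranges_py; infer_instance

-- ===== CLAIM (what is proved, stated in full; the proofs are below) =====
def Claim_equal_compute_phrase_ranges_py : Prop := ∀ (phrase_ids : List Int), Dom_compute_phrase_ranges_py phrase_ids → Spec_compute_phrase_ranges_py phrase_ids (compute_phrase_ranges_py phrase_ids)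

-- ===== LEMMAS AND PROOFS =====

-- leading-run length of x in a list
def pvCnt (x : Int) : List Int → Nat
  | [] => 0
  | y :: t => if y = x then pvCnt x t + 1 else 0

-- reference run-peeling on the list structure, with an integer offset
def pvS (xs : List Int) (off : Int) : List (Int × Int) :=
  match xs with
  | [] => []
  | x :: t =>
      let k := pvCnt x t
      (off, off + 1 + (k : Int)) :: pvS (t.drop k) (off + 1 + (k : Int))
termination_by xs.length
decreasing_by simp only [List.length_drop, List.length_cons]; omega

theorem pvS_nil (off : Int) : pvS [] off = [] := by
  rw [pvS.eq_def]

theorem pvS_cons (x : Int) (t : List Int) (off : Int) :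
    pvS (x :: t) off
      = (off, off + 1 + (pvCnt x t : Int)) :: pvS (t.drop (pvCnt x t)) (off + 1 + (pvCnt x t : Int)) := by
  rw [pvS.eq_def]

theorem pvCnt_le (x : Int) (t : List Int) : pvCnt x t ≤ t.length := by
  induction t with
  | nil => simp [pvCnt]
  | cons y t ih =>
    simp only [pvCnt, List.length_cons]
    split
    · omega
    · omega

-- every position j ≤ pvCnt x t in x :: t holds x
theorem pvRun_val (x : Int) (t : List Int) (j : Nat) (hj : j ≤ pvCnt x t) :
    (x :: t).getD j 0 = x := by
  induction t generalizing j x with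
  | nil =>
    have hz : pvCnt x [] = 0 := rfl
    rw [hz] at hj
    have hj0 : j = 0 := Nat.le_zero.mp hj
    subst hj0; rfl
  | cons y t ih =>
    by_cases hy : y = x
    · subst hy
      rw [pvCnt, if_pos rfl] at hj
      match j with
      | 0 => rfl
      | j + 1 => exact ih y j (by omega)
    · rw [pvCnt, if_neg hy] at hj
      have hj0 : j = 0 := by omega
      subst hj0; rfl

-- the first position after the run differs
theorem pvRun_diff (x : Int) (t : List Int) (hk : pvCnt x t < t.length) :
    t.getD (pvCnt x t) 0 ≠ x := by
  induction t generalizing x with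
  | nil => simp at hk
  | cons y t ih =>
    by_cases hy : y = x
    · subst hy
      rw [pvCnt, if_pos rfl] at hk ⊢
      rw [List.length_cons] at hk
      simpa using ih y (by omega)
    · rw [pvCnt, if_neg hy]
      simpa using hy

-- characterization of the inner while loop; e is a Nat index into xs
theorem pvRunEnd_eq (xs : List Int) (x : Int) (e : Nat) :
    pvRunEnd xs (xs.length : Int) x (e : Int) = (e : Int) + (pvCnt x (xs.drop e) : Int) := by
  rw [pvRunEnd]
  by_cases he : e < xs.length
  · have hdrop : xs.drop e = xs[e] :: xs.drop (e + 1) := List.drop_eq_getElem_cons he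
    have hget : PySem.List.pyGetD xs (e : Int) 0 = xs[e] := by
      rw [PySem.List.pyGetD_natCast, List.getD_eq_getElem _ _ he]
    by_cases hx : xs[e] = x
    · rw [dif_pos ⟨by exact_mod_cast he, by rw [hget, hx]⟩]
      have : ((e : Int) + 1) = ((e + 1 : Nat) : Int) := by push_cast; ring
      rw [this, pvRunEnd_eq xs x (e + 1)]
      rw [hdrop]
      simp [pvCnt, hx]
      push_cast; ring
    · rw [dif_neg (by rw [hget]; tauto)]
      rw [hdrop]
      simp [pvCnt, hx]
  · rw [dif_neg (fun hc => he (by exact_mod_cast hc.1))]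
    rw [List.drop_eq_nil_of_le (by omega)]
    simp [pvCnt]
termination_by xs.length - e
decreasing_by omega

-- the outer while loop computes pvS on the dropped suffix
theorem pvPeel_eq (xs : List Int) (pos : Nat) (acc : List (Int × Int)) (h : pos ≤ xs.length) :
    pvPeel xs (xs.length : Int) (pos : Int) acc = acc ++ pvS (xs.drop pos) (pos : Int) := by
  rw [pvPeel]
  by_cases hp : pos < xs.length
  · have hdrop : xs.drop pos = xs[pos] :: xs.drop (pos + 1) := List.drop_eq_getElem_cons hp
    have hget : PySem.List.pyGetD xs (pos : Int) 0 = xs[pos] := by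
      rw [PySem.List.pyGetD_natCast, List.getD_eq_getElem _ _ hp]
    rw [dif_pos (by exact_mod_cast hp)]
    set x := xs[pos] with hx
    set k := pvCnt x (xs.drop (pos + 1)) with hk
    clear_value x k
    have hre : pvRunEnd xs (xs.length : Int) (PySem.List.pyGetD xs (pos : Int) 0) ((pos : Int) + 1)
        = ((pos + 1 + k : Nat) : Int) := by
      rw [hget]
      have e1 : ((pos : Int) + 1) = ((pos + 1 : Nat) : Int) := by omega
      rw [e1, pvRunEnd_eq xs x (pos + 1), ← hk]
      omega
    have hkle : k ≤ xs.length - (pos + 1) := by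
      have h2 := pvCnt_le x (xs.drop (pos + 1))
      rw [List.length_drop] at h2
      omega
    rw [hre, pvPeel_eq xs (pos + 1 + k) _ (by omega)]
    conv_rhs => rw [hdrop, pvS_cons]
    rw [← hk, List.drop_drop]
    have e3 : (pos : Int) + 1 + (k : Int) = ((pos + 1 + k : Nat) : Int) := by omega
    rw [e3]
    simp
  · rw [dif_neg (fun hc => hp (by exact_mod_cast hc))]
    rw [List.drop_eq_nil_of_le (by omega), pvS_nil]
    simp
termination_by xs.length - pos
decreasing_by
  have := pvCnt_le xs[pos] (xs.drop (pos + 1))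
  omega

-- fold over indices with no boundary is the identity
theorem pvFold_id (p : Int → Prop) [DecidablePred p] (g : List (Int × Int) × Int → Int → List (Int × Int) × Int)
    (l : List Int) (st : List (Int × Int) × Int) (h : ∀ i ∈ l, ¬ p i) :
    l.foldl (fun st i => if p i then g st i else st) st = st := by
  induction l generalizing st with
  | nil => rfl
  | cons a t ih =>
    rw [List.foldl_cons, if_neg (h a (by simp))]
    exact ih st (fun i hi => h i (by simp [hi]))

-- A's fold from any run start pos produces pvS on the dropped suffix
theorem pvA_eq (xs : List Int) (pos : Nat) (rs : List (Int × Int)) (h : pos < xs.length) :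
    (let st := (PySem.List.pyRange ((pos : Int) + 1) (xs.length : Int) 1).foldl
      (fun (st : List (Int × Int) × Int) index =>
        if PySem.List.pyGetD xs index 0 ≠ PySem.List.pyGetD xs (index - 1) 0 then
          (st.1 ++ [(st.2, index)], index)
        else st)
      (rs, (pos : Int))
     st.1 ++ [(st.2, (xs.length : Int))])
    = rs ++ pvS (xs.drop pos) (pos : Int) := by
  have hdrop : xs.drop pos = xs[pos] :: xs.drop (pos + 1) := List.drop_eq_getElem_cons h
  set x := xs[pos] with hx
  set k := pvCnt x (xs.drop (pos + 1)) with hk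
  clear_value x k
  have hkle : k ≤ xs.length - (pos + 1) := by
    have h2 := pvCnt_le x (xs.drop (pos + 1))
    rw [List.length_drop] at h2
    omega
  -- values inside the run: xs.getD (pos + j) 0 = x for j ≤ k
  have hrunval : ∀ j : Nat, j ≤ k → xs.getD (pos + j) 0 = x := by
    intro j hj
    have hjlt : pos + j < xs.length := by omega
    rw [List.getD_eq_getElem _ _ hjlt]
    have h1 : xs[pos + j] = (xs.drop pos).getD j 0 := by
      rw [List.getD_eq_getElem _ _ (by simp [List.length_drop]; omega)]
      simp [List.getElem_drop]
    rw [h1, hdrop]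
    exact pvRun_val x _ j (hk ▸ hj)
  -- split the range at the end of the run
  have hsplit : PySem.List.pyRange ((pos : Int) + 1) (xs.length : Int) 1
      = PySem.List.pyRange ((pos : Int) + 1) ((pos : Int) + 1 + (k : Int)) 1
        ++ PySem.List.pyRange ((pos : Int) + 1 + (k : Int)) (xs.length : Int) 1 :=
    PySem.List.pyRange_one_append _ _ _ (by omega) (by exact_mod_cast (by omega : (pos + 1 + k : Int) ≤ (xs.length : Int)))
  simp only [hsplit, List.foldl_append]
  -- the fold over the run segment is the identity
  rw [pvFold_id (fun i => PySem.List.pyGetD xs i 0 ≠ PySem.List.pyGetD xs (i - 1) 0) _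
    (PySem.List.pyRange ((pos : Int) + 1) ((pos : Int) + 1 + (k : Int)) 1) _
    (by
      intro i hi
      rw [PySem.List.mem_pyRange_one] at hi
      obtain ⟨j, hj1, hj2, rfl⟩ : ∃ j : Nat, 1 ≤ j ∧ j ≤ k ∧ i = (pos : Int) + (j : Int) := by
        refine ⟨(i - pos).toNat, by omega, by omega, by omega⟩
      simp only [not_not]
      have e1 : (pos : Int) + (j : Int) = ((pos + j : Nat) : Int) := by push_cast; ring
      have e2 : ((pos + j : Nat) : Int) - 1 = ((pos + (j - 1) : Nat) : Int) := by omega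
      rw [e1, e2, PySem.List.pyGetD_natCast, PySem.List.pyGetD_natCast,
        hrunval j hj2, hrunval (j - 1) (by omega)])]
  by_cases hend : pos + 1 + k = xs.length
  · -- run reaches the end of the list
    rw [PySem.List.pyRange_one_eq_nil (by omega)]
    simp only [List.foldl_nil]
    conv_rhs => rw [hdrop, pvS_cons]
    rw [← hk]
    have hdk : (xs.drop (pos + 1)).drop k = [] := by
      rw [List.drop_drop]
      exact List.drop_eq_nil_of_le (by omega)
    rw [hdk, pvS_nil]
    have e3 : (pos : Int) + 1 + (k : Int) = (xs.length : Int) := by push_cast; omega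
    rw [e3]
  · -- a boundary at pos + 1 + k, then recurse on the next run
    have hlt : pos + 1 + k < xs.length := by omega
    rw [PySem.List.pyRange_one_cons (by exact_mod_cast (by omega : (pos + 1 + k : Int) < (xs.length : Int)))]
    rw [List.foldl_cons]
    have hb1 : PySem.List.pyGetD xs ((pos : Int) + 1 + (k : Int)) 0 ≠ x := by
      have e1 : (pos : Int) + 1 + (k : Int) = ((pos + 1 + k : Nat) : Int) := by push_cast; ring
      rw [e1, PySem.List.pyGetD_natCast, List.getD_eq_getElem _ _ hlt]
      have h1 : xs[pos + 1 + k] = (xs.drop (pos + 1)).getD k 0 := by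
        rw [List.getD_eq_getElem _ _ (by simp [List.length_drop]; omega)]
        simp [List.getElem_drop]
      rw [h1, hk]
      exact pvRun_diff x _ (by rw [← hk]; simp [List.length_drop]; omega)
    have hb2 : PySem.List.pyGetD xs ((pos : Int) + 1 + (k : Int) - 1) 0 = x := by
      have e2 : (pos : Int) + 1 + (k : Int) - 1 = ((pos + k : Nat) : Int) := by push_cast; ring
      rw [e2, PySem.List.pyGetD_natCast]
      exact hrunval k (le_refl k)
    rw [if_pos (by rw [hb2]; exact hb1)]
    have e3 : (pos : Int) + 1 + (k : Int) = ((pos + 1 + k : Nat) : Int) := by push_cast; ring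
    simp only [e3]
    rw [pvA_eq xs (pos + 1 + k) (rs ++ [((pos : Int), ((pos + 1 + k : Nat) : Int))]) hlt]
    conv_rhs => rw [hdrop, pvS_cons]
    rw [← hk, List.drop_drop, e3]
    simp
termination_by xs.length - pos
decreasing_by
  have := pvCnt_le xs[pos] (xs.drop (pos + 1))
  omega

-- ===== VERDICT (by name: the statement is the Claim_ definition above) =====
theorem compute_phrase_ranges_py_spec : Claim_equal_compute_phrase_ranges_py := by
  intro phrase_ids _
  unfold Spec_compute_phrase_ranges_py compute_phrase_ranges_py compute_phrase_ranges_py_alt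
  by_cases h : phrase_ids = []
  · subst h
    rw [pvPeel]
    simp
  · rw [if_neg h]
    have hlen : 0 < phrase_ids.length := List.length_pos_iff.mpr h
    have h0 : ((0 : Nat) : Int) = (0 : Int) := rfl
    rw [← h0, pvPeel_eq phrase_ids 0 [] (by omega)]
    have hA := pvA_eq phrase_ids 0 [] hlen
    simp only [Nat.cast_zero, zero_add] at hA ⊢
    rw [List.drop_zero] at hA
    rw [List.drop_zero]
    exact hA
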